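-- pv_equiv track=rewrite | github.com/itsawaz/Testify | app.py | extract_action_words
-- ===== SOURCE A (Python) =====
-- def extract_action_words(description):
--     """Extract key action verbs from a step description."""
--     common_actions = [
--         "navigate", "click", "input", "type", "enter", "select", "verify", "check",
--         "submit", "search", "scroll", "drag", "drop", "hover", "focus", "upload",
--         "download", "accept", "dismiss", "confirm", "cancel", "wait", "read", "extract"
--     ]
--
--     words = description.lower().split()
--     found_actions = []
--
--     for action in common_actions:
--         if action in words or any(w.startswith(action) for w in words):
--             found_actions.append(action)
--
--     return found_actions
-- ===== SOURCE B (Python) =====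
-- def extract_action_words(description):
--     """Extract key action verbs from a step description."""
--     common_actions = [
--         "navigate", "click", "input", "type", "enter", "select", "verify", "check",
--         "submit", "search", "scroll", "drag", "drop", "hover", "focus", "upload",
--         "download", "accept", "dismiss", "confirm", "cancel", "wait", "read", "extract"
--     ]
--
--     maxlen = max(len(a) for a in common_actions)
--     prefixes = set()
--     for w in description.lower().split():
--         for i in range(1, min(len(w), maxlen) + 1):
--             prefixes.add(w[:i])
--
--     return [a for a in common_actions if a in prefixes]
-- ===== Notes on version B (the rewrite author's own statement) =====
-- stated objective: alternative
-- what changed: B builds a one-time set of all word prefixes up to the maximum action length and then filters the fixed action list by constant-time set membership, replacing A's nested per-action scan (list membership plus startswith scan) over the word list.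
import Mathlib
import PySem

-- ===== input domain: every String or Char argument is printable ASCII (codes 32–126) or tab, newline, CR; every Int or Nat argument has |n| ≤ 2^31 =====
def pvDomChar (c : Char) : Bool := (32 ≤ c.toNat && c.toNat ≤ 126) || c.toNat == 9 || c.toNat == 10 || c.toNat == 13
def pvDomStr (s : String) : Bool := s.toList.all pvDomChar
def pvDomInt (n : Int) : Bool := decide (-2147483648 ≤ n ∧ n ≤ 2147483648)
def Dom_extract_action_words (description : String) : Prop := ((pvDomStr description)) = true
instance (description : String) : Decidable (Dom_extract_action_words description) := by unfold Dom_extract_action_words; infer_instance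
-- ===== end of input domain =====

-- B rebuilds the result via a one-time prefix set instead of A's nested per-action scan of the words (alternative decomposition, same result).

-- ===== PORT A =====
def extract_action_words (description : String) : List String :=
  let common_actions : List String := [
    "navigate", "click", "input", "type", "enter", "select", "verify", "check",
    "submit", "search", "scroll", "drag", "drop", "hover", "focus", "upload",
    "download", "accept", "dismiss", "confirm", "cancel", "wait", "read", "extract"]
  let words := PySem.Str.split₀ (PySem.Str.lower description)
  common_actions.foldl
    (fun found action =>
      if words.contains action || words.any (fun w => PySem.Str.startswith w action)
      then found ++ [action] else found) []

-- ===== PORT B =====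
def extract_action_words_alt (description : String) : List String :=
  let common_actions : List String := [
    "navigate", "click", "input", "type", "enter", "select", "verify", "check",
    "submit", "search", "scroll", "drag", "drop", "hover", "focus", "upload",
    "download", "accept", "dismiss", "confirm", "cancel", "wait", "read", "extract"]
  let maxlen : Int :=
    (PySem.List.max? (common_actions.map (fun a => (PySem.Str.len a : Int))) (fun x => x)).getD 0
  let prefixes : PySem.Set String :=
    (PySem.Str.split₀ (PySem.Str.lower description)).foldl
      (fun s w =>
        (PySem.List.pyRange 1 (min (PySem.Str.len w : Int) maxlen + 1) 1).foldl
          (fun s i => PySem.Set.add s (PySem.Str.slice w none (some i))) s)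
      PySem.Set.empty
  common_actions.filter (fun a => PySem.Set.contains prefixes a)

-- ===== PRECONDITION & SPEC =====
def Spec_extract_action_words (description : String) (out : List String) : Prop := out = extract_action_words_alt description
instance (description : String) (out : List String) : Decidable (Spec_extract_action_words description out) := by unfold Spec_extract_action_words; infer_instance

-- ===== CLAIM (what is proved, stated in full; the proofs are below) =====
def Claim_equal_extract_action_words : Prop := ∀ (description : String), Dom_extract_action_words description → Spec_extract_action_words description (extract_action_words description)

-- ===== LEMMAS AND PROOFS =====

-- membership in the prefix set built by B's nested fold
theorem pv_mem_build (ws : List String) (s : PySem.Set String) (a : String) :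
    a ∈ ws.foldl
      (fun s w =>
        (PySem.List.pyRange 1 (min (PySem.Str.len w : Int) 8 + 1) 1).foldl
          (fun s i => PySem.Set.add s (PySem.Str.slice w none (some i))) s) s
    ↔ a ∈ s ∨ ∃ w ∈ ws, ∃ i ∈ PySem.List.pyRange 1 (min (PySem.Str.len w : Int) 8 + 1) 1,
        a = PySem.Str.slice w none (some i) := by
  induction ws generalizing s with
  | nil => simp
  | cons w ws ih =>
    simp only [List.foldl_cons, ih, PySem.Set.mem_foldl_add]
    constructor
    · rintro (⟨h | ⟨i, hi, rfl⟩⟩ | ⟨w', hw', hi⟩)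
      · exact Or.inl h
      · exact Or.inr ⟨w, List.mem_cons_self .., ⟨i, hi, rfl⟩⟩
      · exact Or.inr ⟨w', List.mem_cons_of_mem _ hw', hi⟩
    · rintro (h | ⟨w', hw', i, hi, rfl⟩)
      · exact Or.inl (Or.inl h)
      · rcases List.mem_cons.mp hw' with rfl | hw'
        · exact Or.inl (Or.inr ⟨i, hi, rfl⟩)
        · exact Or.inr ⟨w', hw', ⟨i, hi, rfl⟩⟩

-- a nonempty string is a prefix of w iff it is one of w's slices w[:i], 1 ≤ i ≤ len w
theorem pv_prefix_iff_slice (w a : String) (ha : a.toList ≠ [])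
    (ha8 : a.toList.length ≤ 8) :
    a.toList <+: w.toList ↔
      ∃ i ∈ PySem.List.pyRange 1 (min (PySem.Str.len w : Int) 8 + 1) 1,
        a = PySem.Str.slice w none (some i) := by
  constructor
  · intro hp
    refine ⟨(a.toList.length : Int), ?_, ?_⟩
    · rw [PySem.List.mem_pyRange_one]
      have h1 : 0 < a.toList.length := List.length_pos_iff.mpr ha
      have h2 : a.toList.length ≤ w.toList.length := hp.length_le
      have hlen : (PySem.Str.len w : Int) = (w.toList.length : Int) := by simp
      omega
    · apply String.toList_injective
      rw [PySem.Str.toList_slice]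
      simp only [PySem.Chars.slice_eq_listSlice]
      rw [PySem.List.slice_to_natCast]
      exact (List.prefix_iff_eq_take.mp hp)
  · rintro ⟨i, hi, rfl⟩
    rw [PySem.List.mem_pyRange_one] at hi
    rw [PySem.Str.toList_slice]
    simp only [PySem.Chars.slice_eq_listSlice]
    obtain ⟨hi1, hi2⟩ := hi
    rw [PySem.List.slice_to w.toList (by omega : (0:Int) ≤ i)]
    exact List.take_prefix _ _

-- the per-action condition of A equals B's set membership
theorem pv_cond_eq (ws : List String) (a : String) (ha : a.toList ≠ [])
    (ha8 : a.toList.length ≤ 8) :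
    (ws.contains a || ws.any (fun w => PySem.Str.startswith w a)) =
    PySem.Set.contains
      (ws.foldl
        (fun s w =>
          (PySem.List.pyRange 1 (min (PySem.Str.len w : Int) 8 + 1) 1).foldl
            (fun s i => PySem.Set.add s (PySem.Str.slice w none (some i))) s)
        PySem.Set.empty) a := by
  apply Bool.coe_iff_coe.mp
  rw [PySem.Set.contains_iff, pv_mem_build]
  simp only [PySem.Set.empty, List.not_mem_nil, false_or]
  simp only [Bool.or_eq_true, List.contains_iff_mem, List.any_eq_true,
    PySem.Str.startswith_eq, PySem.Chars.startswith_iff]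
  constructor
  · rintro (hmem | ⟨w, hw, hp⟩)
    · exact ⟨a, hmem, (pv_prefix_iff_slice a a ha ha8).mp (List.prefix_refl _)⟩
    · exact ⟨w, hw, (pv_prefix_iff_slice w a ha ha8).mp hp⟩
  · rintro ⟨w, hw, hs⟩
    exact Or.inr ⟨w, hw, (pv_prefix_iff_slice w a ha ha8).mpr hs⟩

-- ===== VERDICT (by name: the statement is the Claim_ definition above) =====
theorem extract_action_words_spec : Claim_equal_extract_action_words := by
  intro description _
  unfold Spec_extract_action_words extract_action_words extract_action_words_alt
  rw [PySem.List.foldl_append_if_eq_filter]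
  rw [List.nil_append]
  apply List.filter_congr
  intro a ha
  have hne : a.toList ≠ [] := by fin_cases ha <;> decide
  have h8 : a.toList.length ≤ 8 := by fin_cases ha <;> decide
  have hmax : (PySem.List.max?
      (([("navigate" : String), "click", "input", "type", "enter", "select", "verify", "check",
        "submit", "search", "scroll", "drag", "drop", "hover", "focus", "upload",
        "download", "accept", "dismiss", "confirm", "cancel", "wait", "read", "extract"]).map
        (fun a => (PySem.Str.len a : Int))) (fun x => x)).getD 0 = (8 : Int) := by decide
  rw [hmax]
  exact pv_cond_eq _ a hne h8
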